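-- pv_equiv track=rewrite | github.com/DJTakushi/codingProblems | az07.py | can_segment_string
-- ===== SOURCE A (Python) =====
-- def can_segment_string(s, dictionary):
--     strLen=len(s)
--     hashSet=set()
--     for idx in range(strLen):
--         markToContinue=False
--         a=s[0:idx]
--         b=s[idx:strLen]
--         if a not in dictionary:
--             hashSet.add(a)
--             markToContinue=True
--         if b not in dictionary:
--             hashSet.add(b)
--             markToContinue=True
--         if not markToContinue:
--             return True
--     return False
-- ===== SOURCE B (Python) =====
-- def can_segment_string(s, dictionary):
--     # Iterate over dictionary words as candidate prefixes instead of over all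
--     # split positions; suffix membership is tested in a hash set.
--     dset = set(dictionary)
--     n = len(s)
--     for w in dictionary:
--         if len(w) < n and s.startswith(w) and s[len(w):] in dset:
--             return True
--     return False
-- ===== Notes on version B (the rewrite author's own statement) =====
-- stated objective: faster
-- what changed: B scans the dictionary words as candidate prefixes (startswith + hash-set suffix lookup) instead of scanning every split position of s with linear 'in dictionary' list searches.
import Mathlib
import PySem

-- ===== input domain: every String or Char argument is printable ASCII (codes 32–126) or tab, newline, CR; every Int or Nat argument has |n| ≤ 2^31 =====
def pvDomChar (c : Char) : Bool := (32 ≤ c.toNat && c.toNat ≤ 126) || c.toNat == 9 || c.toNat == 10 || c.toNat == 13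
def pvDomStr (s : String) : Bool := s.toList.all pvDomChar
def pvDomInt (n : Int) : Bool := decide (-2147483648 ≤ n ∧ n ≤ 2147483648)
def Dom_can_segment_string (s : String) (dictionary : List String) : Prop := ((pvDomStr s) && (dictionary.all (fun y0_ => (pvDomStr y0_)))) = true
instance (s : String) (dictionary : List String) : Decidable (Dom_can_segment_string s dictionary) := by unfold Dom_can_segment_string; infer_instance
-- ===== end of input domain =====

-- B scans the dictionary words as candidate prefixes (startswith + set lookup for the suffix)
-- instead of A's scan over every split position of s with linear 'in dictionary' searches; faster (asymptotic).

-- ===== PORT A =====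
-- the loop body of A, over the remaining idx values, carrying hashSet (on List Char)
def canSegLoopA (cs : List Char) (dict : List (List Char)) (idxs : List Int)
    (hashSet : PySem.Set (List Char)) : Bool :=
  match idxs with
  | [] => false
  | idx :: rest =>
    let a := PySem.List.slice cs (some 0) (some idx)
    let b := PySem.List.slice cs (some idx) (some (PySem.Chars.len cs))
    let (hs1, m1) := if !(dict.contains a) then (PySem.Set.add hashSet a, true) else (hashSet, false)
    let (hs2, m2) := if !(dict.contains b) then (PySem.Set.add hs1 b, true) else (hs1, m1)
    if !m2 then true else canSegLoopA cs dict rest hs2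

def can_segment_string (s : String) (dictionary : List String) : Bool :=
  let cs := s.toList
  canSegLoopA cs (dictionary.map String.toList)
    (PySem.List.pyRange 0 (PySem.Chars.len cs) 1) PySem.Set.empty

-- ===== PORT B =====
-- the loop of B: words of the dictionary as candidate prefixes
def canSegLoopB (cs : List Char) (dset : PySem.Set (List Char)) (ws : List (List Char)) : Bool :=
  match ws with
  | [] => false
  | w :: rest =>
    if w.length < cs.length && PySem.Chars.startswith cs w
        && PySem.Set.contains dset (PySem.List.slice cs (some (w.length : Int)) none) then true
    else canSegLoopB cs dset rest

def can_segment_string_alt (s : String) (dictionary : List String) : Bool :=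
  let dict := dictionary.map String.toList
  canSegLoopB s.toList (PySem.Set.ofList dict) dict

-- ===== PRECONDITION & SPEC =====
def Spec_can_segment_string (s : String) (dictionary : List String) (out : Bool) : Prop := out = can_segment_string_alt s dictionary
instance (s : String) (dictionary : List String) (out : Bool) : Decidable (Spec_can_segment_string s dictionary out) := by unfold Spec_can_segment_string; infer_instance

-- ===== CLAIM (what is proved, stated in full; the proofs are below) =====
def Claim_equal_can_segment_string : Prop := ∀ (s : String) (dictionary : List String), Dom_can_segment_string s dictionary → Spec_can_segment_string s dictionary (can_segment_string s dictionary)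

-- ===== LEMMAS AND PROOFS =====

-- A's loop ignores hashSet for its result: it is an 'any' over the index list
theorem canSegLoopA_eq_any (cs : List Char) (dict : List (List Char)) (idxs : List Int)
    (hs : PySem.Set (List Char)) :
    canSegLoopA cs dict idxs hs =
      idxs.any (fun idx => dict.contains (PySem.List.slice cs (some 0) (some idx))
        && dict.contains (PySem.List.slice cs (some idx) (some (PySem.Chars.len cs)))) := by
  induction idxs generalizing hs with
  | nil => rfl
  | cons idx rest ih =>
    by_cases h1 : PySem.List.slice cs none (some idx) ∈ dict <;>
      by_cases h2 : PySem.List.slice cs (some idx) (some ((cs.length : Int))) ∈ dict <;>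
      simp [canSegLoopA, h1, h2, ih]

-- B's loop is an 'any' over the words
theorem canSegLoopB_eq_any (cs : List Char) (dset : PySem.Set (List Char)) (ws : List (List Char)) :
    canSegLoopB cs dset ws =
      ws.any (fun w => w.length < cs.length && PySem.Chars.startswith cs w
        && PySem.Set.contains dset (PySem.List.slice cs (some (w.length : Int)) none)) := by
  induction ws with
  | nil => rfl
  | cons w rest ih =>
    simp only [canSegLoopB, List.any_cons]
    split <;> simp_all

-- ===== VERDICT (by name: the statement is the Claim_ definition above) =====
theorem can_segment_string_spec : Claim_equal_can_segment_string := by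
  intro s dictionary _
  unfold Spec_can_segment_string can_segment_string can_segment_string_alt
  rw [canSegLoopA_eq_any, canSegLoopB_eq_any, Bool.eq_iff_iff]
  simp only [List.any_eq_true, Bool.and_eq_true, decide_eq_true_eq, PySem.Chars.len_eq,
    PySem.List.slice_zero_start, List.contains_eq_mem, PySem.Chars.startswith_iff,
    PySem.Set.contains_eq_listContains, PySem.Set.mem_ofList]
  constructor
  · rintro ⟨idx, hmem, ha, hb⟩
    rw [PySem.List.mem_pyRange_one] at hmem
    obtain ⟨h0, hlt⟩ := hmem
    obtain ⟨k, rfl⟩ := Int.eq_ofNat_of_zero_le h0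
    have hk : k < (s.toList).length := by exact_mod_cast hlt
    rw [PySem.List.slice_to_natCast] at ha
    rw [PySem.List.slice_natCast] at hb
    rw [List.take_of_length_le (by simp)] at hb
    refine ⟨s.toList.take k, ha, ⟨?_, List.take_prefix k _⟩, ?_⟩
    · simpa [List.length_take] using hk
    · have hlen : (s.toList.take k).length = k := by rw [List.length_take, Nat.min_eq_left hk.le]
      rw [hlen, PySem.List.slice_from_natCast]
      simpa using hb
  · rintro ⟨w, hw, ⟨hlen, hpre⟩, hsuf⟩
    refine ⟨(w.length : Int), ?_, ?_, ?_⟩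
    · rw [PySem.List.mem_pyRange_one]
      constructor
      · positivity
      · exact_mod_cast hlen
    · rw [PySem.List.slice_to_natCast]
      rwa [List.prefix_iff_eq_take.mp hpre] at hw
    · rw [PySem.List.slice_natCast, List.take_of_length_le (by simp)]
      rwa [PySem.List.slice_from_natCast] at hsuf
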